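-- pv_equiv track=rewrite | github.com/firefly2442/aoc-2018 | app/plugins/day-8-2.py | parse
-- ===== SOURCE A (Python) =====
-- def parse(data):
--     children, metas = data[:2]
--
--     scores = []
--     data = data[2:]
--
--     for child in range(children):
--         score, data = parse(data)
--         scores.append(score)
--
--     if children == 0:
--         return sum(data[:metas]), data[metas:]
--     else:
--         score = 0
--         for meta_key in data[:metas]:
--             if meta_key > 0 and meta_key <= len(scores):
--                 score += scores[meta_key - 1]
--         return score, data[metas:]
-- ===== SOURCE B (Python) =====
-- def parse(data):
--     # Iterative parser: an explicit stack of node frames instead of recursion.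
--     # Frame layout: [children, metas, countdown, child_scores].
--     stack = []
--     while True:
--         children, metas = data[:2]
--         data = data[2:]
--         stack.append([children, metas, children, []])
--         while stack[-1][2] <= 0:
--             children, metas, _, scores = stack.pop()
--             if children == 0:
--                 value = sum(data[:metas])
--             else:
--                 value = 0
--                 for m in data[:metas]:
--                     if 0 < m <= len(scores):
--                         value += scores[m - 1]
--             data = data[metas:]
--             if not stack:
--                 return value, data
--             stack[-1][2] -= 1
--             stack[-1][3].append(value)
-- ===== Notes on version B (the rewrite author's own statement) =====
-- stated objective: alternative
-- what changed: Replaces A's recursive descent parser by an iterative parser driven by an explicit stack of node frames (children, metas, countdown, collected child scores); Pre_ excludes only the truncated encodings on which A raises ValueError at the two-element unpack.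
import Mathlib
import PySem

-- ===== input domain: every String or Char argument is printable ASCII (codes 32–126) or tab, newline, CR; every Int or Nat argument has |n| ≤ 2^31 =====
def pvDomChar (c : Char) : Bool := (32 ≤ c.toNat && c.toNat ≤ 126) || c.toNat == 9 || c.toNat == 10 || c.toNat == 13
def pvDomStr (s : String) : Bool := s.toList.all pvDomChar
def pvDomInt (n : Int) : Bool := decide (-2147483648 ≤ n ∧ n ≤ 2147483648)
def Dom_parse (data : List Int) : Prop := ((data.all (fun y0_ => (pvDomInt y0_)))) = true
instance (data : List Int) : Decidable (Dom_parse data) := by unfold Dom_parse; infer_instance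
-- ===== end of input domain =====

-- B replaces A's recursive descent parser by an iterative parser over an explicit stack of
-- node frames (objective: alternative decomposition; A = B proved on all inputs where A returns).


-- ===== PORT A =====
-- shared helper: the metadata-scoring loop both Pythons contain, line for line
-- (for m in block: if m > 0 and m <= len(scores): score += scores[m-1])
def metaScore (scores : List Int) (block : List Int) : Int :=
  block.foldl (fun acc mk =>
    if 0 < mk ∧ mk ≤ PySem.List.len scores then acc + PySem.List.pyGetD scores (mk - 1) 0
    else acc) 0

-- A, transliterated: recursion with fuel (a totality device only; fuel bounds the nesting
-- depth, which is at most data.length/2 + 1, so data.length + 1 is always enough).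
-- The for-child loop is parameterised by the recursive call so the recursion stays structural.
-- range(children) is empty for children <= 0, i.e. c.toNat iterations.
def parseKidsF (f : List Int → Option (Int × List Int)) : Nat → List Int → Option (List Int × List Int)
  | 0, d => some ([], d)
  | k + 1, d =>
    match f d with
    | none => none
    | some (sc, d') =>
      match parseKidsF f k d' with
      | none => none
      | some (ss, d2) => some (sc :: ss, d2)

def parseA? : Nat → List Int → Option (Int × List Int)
  | 0, _ => none
  | fuel + 1, data =>
    match data with
    | c :: m :: rest =>
      match parseKidsF (parseA? fuel) c.toNat rest with
      | none => none
      | some (scores, d2) =>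
        let block := PySem.List.slice d2 none (some m)    -- data[:metas]
        let tail := PySem.List.slice d2 (some m) none     -- data[metas:]
        if c = 0 then some (block.sum, tail)
        else some (metaScore scores block, tail)
    | _ => none                                            -- ValueError: unpack needs 2 values

def parse (data : List Int) : Int × List Int :=
  (parseA? (data.length + 1) data).getD (0, [])

-- ===== PORT B =====
-- frame: (children header, metas, countdown of children still to parse, collected child scores)
abbrev BFrame := Int × Int × Int × List Int

-- the node value once a frame closes: sum of the metadata block for a leaf,
-- sum of the 1-indexed child scores otherwise (B's if/else, with metaScore as the loop)
def nodeVal (ch me : Int) (sc : List Int) (d : List Int) : Int :=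
  if ch = 0 then (PySem.List.slice d none (some me)).sum
  else metaScore sc (PySem.List.slice d none (some me))

-- B's inner while-loop: pop and score every frame whose countdown has reached 0, consuming
-- that frame's metadata block from the front of the data; structural recursion on the stack
def closeAuxB : List Int → BFrame → List BFrame → (Int × List Int) ⊕ (List Int × List BFrame)
  | d, (ch, me, cnt, sc), [] =>
    if cnt ≤ 0 then Sum.inl (nodeVal ch me sc d, PySem.List.slice d (some me) none)
    else Sum.inr (d, [(ch, me, cnt, sc)])
  | d, (ch, me, cnt, sc), (pch, pme, pcnt, psc) :: s' =>
    if cnt ≤ 0 then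
      closeAuxB (PySem.List.slice d (some me) none) (pch, pme, pcnt - 1, psc ++ [nodeVal ch me sc d]) s'
    else Sum.inr (d, (ch, me, cnt, sc) :: (pch, pme, pcnt, psc) :: s')

-- B's outer while-loop: read a header, push the frame, close what is ready.
-- fuel is a totality device only; the data shrinks by ≥ 2 per iteration, so length + 1 is ample.
def runB : Nat → List Int → List BFrame → Option (Int × List Int)
  | 0, _, _ => none
  | fuel + 1, d, stack =>
    match d with
    | c :: m :: rest =>
      match closeAuxB rest (c, m, c, []) stack with
      | Sum.inl r => some r
      | Sum.inr (d', s') => runB fuel d' s'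
    | _ => none                                            -- ValueError: unpack needs 2 values

def parse_alt (data : List Int) : Int × List Int :=
  (runB (data.length + 1) data []).getD (0, [])

-- ===== PRECONDITION & SPEC =====
-- Pre_ = the data starts with one completely encoded tree node: exactly the inputs on which
-- A's two-element unpack never fails (A raises ValueError elsewhere; nothing else is excluded).
-- Well-formedness of recursively header-encoded tree data has no flat bounds/membership form;
-- it is stated as a grammar acceptor that follows the header shape only and computes no values
-- (fuel bounds nesting depth; data.length + 1 always suffices, so acceptance is fuel-independent).
def shapeKF (f : List Int → Option (List Int)) : Nat → List Int → Option (List Int)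
  | 0, d => some d
  | k + 1, d =>
    match f d with
    | none => none
    | some d' => shapeKF f k d'

def shapeN? : Nat → List Int → Option (List Int)
  | 0, _ => none
  | fuel + 1, data =>
    match data with
    | c :: m :: rest =>
      match shapeKF (shapeN? fuel) c.toNat rest with
      | none => none
      | some d2 => some (PySem.List.slice d2 (some m) none)
    | _ => none

def Pre_parse (data : List Int) : Prop := (shapeN? (data.length + 1) data).isSome
instance (data : List Int) : Decidable (Pre_parse data) := by unfold Pre_parse; infer_instance

def pvWitness_parse : List Int := [2, 3, 0, 3, 10, 11, 12, 1, 1, 0, 1, 99, 2, 1, 1, 2]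

def Spec_parse (data : List Int) (out : Int × List Int) : Prop := out = parse_alt data
instance (data : List Int) (out : Int × List Int) : Decidable (Spec_parse data out) := by unfold Spec_parse; infer_instance

-- ===== CLAIM (what is proved, stated in full; the proofs are below) =====
def Claim_equal_parse : Prop := ∀ (data : List Int), Dom_parse data → Pre_parse data → Spec_parse data (parse data)

-- ===== LEMMAS AND PROOFS =====

-- proof-only machinery: the machine run with canonically sufficient fuel,
-- and the two resumption points of B's loops
def Run (d : List Int) (s : List BFrame) : Option (Int × List Int) :=
  runB (d.length + 1) d s

def Resume (d : List Int) (f : BFrame) (s : List BFrame) : Option (Int × List Int) :=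
  match closeAuxB d f s with
  | Sum.inl r => some r
  | Sum.inr (d2, s2) => Run d2 s2

-- what the machine does right after finishing a node of value v with remaining data rest
def finish (rest : List Int) (v : Int) : List BFrame → Option (Int × List Int)
  | [] => some (v, rest)
  | (pch, pme, pcnt, psc) :: s' => Resume rest (pch, pme, pcnt - 1, psc ++ [v]) s'

lemma len_slice_from (xs : List Int) (m : Int) :
    (PySem.List.slice xs (some m) none).length ≤ xs.length := by
  rw [PySem.List.slice_some_none]
  simp

lemma closeAuxB_len : ∀ (s : List BFrame) (d : List Int) (f : BFrame) (d2 : List Int) (s2 : List BFrame),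
    closeAuxB d f s = Sum.inr (d2, s2) → d2.length ≤ d.length := by
  intro s
  induction s with
  | nil =>
    intro d f d2 s2 h
    obtain ⟨ch, me, cnt, sc⟩ := f
    by_cases hc : cnt ≤ 0
    · rw [closeAuxB, if_pos hc] at h; simp at h
    · rw [closeAuxB, if_neg hc] at h
      simp only [Sum.inr.injEq, Prod.mk.injEq] at h
      obtain ⟨rfl, -⟩ := h
      exact le_rfl
  | cons p t ih =>
    intro d f d2 s2 h
    obtain ⟨ch, me, cnt, sc⟩ := f
    obtain ⟨pch, pme, pcnt, psc⟩ := p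
    by_cases hc : cnt ≤ 0
    · rw [closeAuxB, if_pos hc] at h
      have h1 := ih _ _ _ _ h
      have h2 := len_slice_from d me
      omega
    · rw [closeAuxB, if_neg hc] at h
      simp only [Sum.inr.injEq, Prod.mk.injEq] at h
      obtain ⟨rfl, -⟩ := h
      exact le_rfl

lemma runB_stable : ∀ (f₁ f₂ : Nat) (d : List Int) (s : List BFrame),
    d.length < f₁ → d.length < f₂ → runB f₁ d s = runB f₂ d s := by
  intro f₁
  induction f₁ with
  | zero => intro f₂ d s h1; omega
  | succ f₁ ih =>
    intro f₂ d s h1 h2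
    obtain ⟨f₂, rfl⟩ : ∃ g, f₂ = g + 1 := ⟨f₂ - 1, by omega⟩
    cases d with
    | nil => rfl
    | cons c t =>
      cases t with
      | nil => rfl
      | cons m rest =>
        rw [runB, runB]
        cases hc : closeAuxB rest (c, m, c, []) s with
        | inl r => rfl
        | inr p =>
          obtain ⟨d', s'⟩ := p
          have := closeAuxB_len _ _ _ _ _ hc
          simp only [List.length_cons] at h1 h2
          exact ih f₂ d' s' (by omega) (by omega)

lemma run_unfold (c m : Int) (rest : List Int) (s : List BFrame) :
    Run (c :: m :: rest) s = Resume rest (c, m, c, []) s := by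
  unfold Run
  simp only [List.length_cons]
  rw [runB]
  cases hc : closeAuxB rest (c, m, c, []) s with
  | inl r => simp [Resume, hc]
  | inr p =>
    obtain ⟨d', s'⟩ := p
    have := closeAuxB_len _ _ _ _ _ hc
    simp only [Resume, hc]
    exact runB_stable _ _ _ _ (by omega) (by omega)

lemma resume_pos (d : List Int) (ch me cnt : Int) (sc : List Int) (s : List BFrame)
    (h : 0 < cnt) : Resume d (ch, me, cnt, sc) s = Run d ((ch, me, cnt, sc) :: s) := by
  cases s with
  | nil => unfold Resume; rw [closeAuxB, if_neg (by omega)]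
  | cons p s' =>
    obtain ⟨pch, pme, pcnt, psc⟩ := p
    unfold Resume
    rw [closeAuxB, if_neg (by omega)]

lemma resume_close (d : List Int) (ch me cnt : Int) (sc : List Int) (s : List BFrame)
    (h : cnt ≤ 0) :
    Resume d (ch, me, cnt, sc) s = finish (PySem.List.slice d (some me) none) (nodeVal ch me sc d) s := by
  cases s with
  | nil =>
    unfold Resume
    rw [closeAuxB, if_pos h]
    rfl
  | cons p s' =>
    obtain ⟨pch, pme, pcnt, psc⟩ := p
    show (match closeAuxB d (ch, me, cnt, sc) ((pch, pme, pcnt, psc) :: s') with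
          | Sum.inl r => some r | Sum.inr (d2, s2) => Run d2 s2) = _
    rw [closeAuxB, if_pos h]
    rfl

theorem node_sim : ∀ (fuel : Nat) (d : List Int) (v : Int) (rest : List Int) (s : List BFrame),
    parseA? fuel d = some (v, rest) → Run d s = finish rest v s := by
  intro fuel
  induction fuel with
  | zero => intro d v rest s h; simp [parseA?] at h
  | succ fuel ih =>
    have kids_sim : ∀ (k : Nat) (d scores d2 : List Int) (ch me cnt : Int) (sc : List Int) (s : List BFrame),
        parseKidsF (parseA? fuel) k d = some (scores, d2) →
        (cnt = (k : Int) ∨ (cnt ≤ 0 ∧ k = 0)) →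
        Resume d (ch, me, cnt, sc) s = Resume d2 (ch, me, cnt - (k : Int), sc ++ scores) s := by
      intro k
      induction k with
      | zero =>
        intro d scores d2 ch me cnt sc s h _
        rw [parseKidsF] at h
        simp only [Option.some.injEq, Prod.mk.injEq] at h
        obtain ⟨rfl, rfl⟩ := h
        simp
      | succ k ihk =>
        intro d scores d2 ch me cnt sc s h hcnt
        have hcnt' : cnt = ((k : Int) + 1) := by
          rcases hcnt with h' | ⟨_, h'⟩
          · push_cast at h'; omega
          · omega
        rw [parseKidsF] at h
        cases hA1 : parseA? fuel d with
        | none => rw [hA1] at h; simp at h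
        | some r1 =>
          obtain ⟨v₁, d₁⟩ := r1
          rw [hA1] at h
          cases hK : parseKidsF (parseA? fuel) k d₁ with
          | none => simp [hK] at h
          | some r2 =>
            obtain ⟨ss, d₂'⟩ := r2
            simp only [hK, Option.some.injEq, Prod.mk.injEq] at h
            obtain ⟨hs, hd⟩ := h
            subst hd
            rw [resume_pos d ch me cnt sc s (by omega),
                ih d v₁ d₁ ((ch, me, cnt, sc) :: s) hA1]
            show Resume d₁ (ch, me, cnt - 1, sc ++ [v₁]) s = _
            rw [ihk d₁ ss d₂' ch me (cnt - 1) (sc ++ [v₁]) s hK (Or.inl (by omega))]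
            rw [← hs]
            have e1 : cnt - 1 - (k : Int) = cnt - ((k + 1 : Nat) : Int) := by push_cast; ring
            rw [e1]
            simp
    intro d v rest s h
    cases d with
    | nil => simp [parseA?] at h
    | cons c t =>
      cases t with
      | nil => simp [parseA?] at h
      | cons m rest0 =>
        rw [parseA?] at h
        cases hK : parseKidsF (parseA? fuel) c.toNat rest0 with
        | none => rw [hK] at h; simp at h
        | some r =>
          obtain ⟨scores, d2⟩ := r
          rw [hK] at h
          have hcnt : c = ((c.toNat : Nat) : Int) ∨ (c ≤ 0 ∧ c.toNat = 0) := by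
            by_cases hc0 : 0 ≤ c
            · left; omega
            · right; constructor
              · omega
              · omega
          rw [run_unfold c m rest0 s,
              kids_sim c.toNat rest0 scores d2 c m c [] s hK hcnt]
          simp only [List.nil_append]
          have hle : c - ((c.toNat : Nat) : Int) ≤ 0 := by omega
          rw [resume_close d2 c m _ scores s hle]
          have hvr : nodeVal c m scores d2 = v ∧ PySem.List.slice d2 (some m) none = rest := by
            unfold nodeVal
            dsimp only at h
            split_ifs at h ⊢ with hc0 <;>
              simp only [Option.some.injEq, Prod.mk.injEq] at h <;>
              exact ⟨h.1, h.2⟩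
          rw [hvr.1, hvr.2]

theorem shape_corr : ∀ (fuel : Nat),
    (∀ d, shapeN? fuel d = (parseA? fuel d).map Prod.snd) ∧
    (∀ k d, shapeKF (shapeN? fuel) k d = (parseKidsF (parseA? fuel) k d).map Prod.snd) := by
  intro fuel
  induction fuel with
  | zero =>
    refine ⟨fun d => by simp [shapeN?, parseA?], fun k d => ?_⟩
    cases k with
    | zero => simp [shapeKF, parseKidsF]
    | succ k => simp [shapeKF, parseKidsF, shapeN?, parseA?]
  | succ fuel ih =>
    have hN : ∀ d, shapeN? (fuel + 1) d = (parseA? (fuel + 1) d).map Prod.snd := by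
      intro d
      match d with
      | [] => simp [shapeN?, parseA?]
      | [c] => simp [shapeN?, parseA?]
      | c :: m :: rest =>
        rw [shapeN?, parseA?, ih.2]
        cases hK : parseKidsF (parseA? fuel) c.toNat rest with
        | none => simp
        | some r =>
          obtain ⟨scores, d2⟩ := r
          dsimp only
          split_ifs <;> simp
    refine ⟨hN, ?_⟩
    intro k
    induction k with
    | zero => intro d; simp [shapeKF, parseKidsF]
    | succ k ihk =>
      intro d
      rw [shapeKF, parseKidsF, hN]
      cases hA : parseA? (fuel + 1) d with
      | none => simp
      | some r =>
        obtain ⟨v, d'⟩ := r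
        dsimp only [Option.map_some]
        rw [ihk d']
        cases hK2 : parseKidsF (parseA? (fuel + 1)) k d' with
        | none => simp
        | some r2 => obtain ⟨ss, d2⟩ := r2; simp

-- ===== VERDICT (by name: the statement is the Claim_ definition above) =====
theorem parse_spec : Claim_equal_parse := by
  intro data _ hpre
  show parse data = parse_alt data
  unfold Pre_parse at hpre
  rw [(shape_corr (data.length + 1)).1 data] at hpre
  obtain ⟨⟨v, rest⟩, hA⟩ : ∃ r, parseA? (data.length + 1) data = some r := by
    cases h : parseA? (data.length + 1) data with
    | none => rw [h] at hpre; simp at hpre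
    | some r => exact ⟨r, rfl⟩
  have h1 : parse data = (v, rest) := by unfold parse; rw [hA]; rfl
  have h2 : parse_alt data = (v, rest) := by
    unfold parse_alt
    have e : runB (data.length + 1) data [] = Run data [] := rfl
    rw [e, node_sim (data.length + 1) data v rest [] hA]
    rfl
  rw [h1, h2]
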